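-- pv_equiv track=rewrite | github.com/egeguenes/javapy | dings/Leaders_in_an_array/Leaders_in_an_array.py | solution
-- ===== SOURCE A (Python) =====
-- def solution( arr , n ): # n = len(arr)
-- 	nums = []
-- 	nums.append(arr[n-1])
-- 	sum_of_nums = 0
-- 	for i in range(n-2 , -1 , -1):
-- 		if arr[i] >= sum_of_nums:
-- 			nums.append(arr[i])
-- 		sum_of_nums += arr[i]
-- 	nums.reverse()
-- 	return nums
-- ===== SOURCE B (Python) =====
-- def solution(arr, n):  # n = len(arr)
--     # Stage 1: a suffix-sum table (suf[i] = sum of head[i:], deliberately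
--     # excluding arr[n-1], which is always kept, as in the original).
--     # Stage 2: a comprehension filter in forward order (no final reverse).
--     head = arr[:n - 1] if n >= 1 else []
--     suf = [0] * (len(head) + 1)
--     for i in range(len(head) - 1, -1, -1):
--         suf[i] = head[i] + suf[i + 1]
--     return [x for i, x in enumerate(head) if x >= suf[i + 1]] + [arr[n - 1]]
-- ===== Notes on version B (the rewrite author's own statement) =====
-- stated objective: alternative
-- what changed: Replaces A's single backward accumulate-and-append loop plus final reverse with a two-stage decomposition: precompute a suffix-sum table in one backward pass, then filter the prefix with a forward comprehension against the table, so the result is built in order with no reverse.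
import Mathlib
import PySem

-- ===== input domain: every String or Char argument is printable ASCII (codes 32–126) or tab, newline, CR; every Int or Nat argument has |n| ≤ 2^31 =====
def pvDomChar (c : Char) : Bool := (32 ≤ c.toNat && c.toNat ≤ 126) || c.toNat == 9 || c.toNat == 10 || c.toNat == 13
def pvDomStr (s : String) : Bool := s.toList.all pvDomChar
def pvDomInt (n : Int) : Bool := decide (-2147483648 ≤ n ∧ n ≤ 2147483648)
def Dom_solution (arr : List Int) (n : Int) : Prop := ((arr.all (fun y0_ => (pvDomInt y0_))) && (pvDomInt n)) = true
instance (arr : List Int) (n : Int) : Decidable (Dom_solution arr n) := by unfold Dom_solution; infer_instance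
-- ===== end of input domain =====

-- B replaces A's backward accumulate-and-append loop plus final reverse with a
-- two-stage decomposition: a suffix-sum table built backward, then a forward
-- comprehension filter against the table (no reverse); same O(n) cost.

-- ===== PORT A =====
def solution (arr : List Int) (n : Int) : List Int :=
  -- nums starts as [arr[n-1]]; indices are in range under Pre_solution (pyGetD default unreachable there)
  (((PySem.List.pyRange (n - 2) (-1) (-1)).foldl
    (fun (st : List Int × Int) i =>
      (if PySem.List.pyGetD arr i 0 ≥ st.2 then st.1 ++ [PySem.List.pyGetD arr i 0] else st.1,
       st.2 + PySem.List.pyGetD arr i 0))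
    ([PySem.List.pyGetD arr (n - 1) 0], 0)).1).reverse

-- ===== PORT B =====
-- The backward table-filling loop 'suf[i] = head[i] + suf[i+1]' is a foldr over
-- head cons-ing each new suffix sum onto the table built so far (exact: same
-- table, filled right to left); the comprehension is zip-with-the-table + filter.
def solution_alt (arr : List Int) (n : Int) : List Int :=
  let head := if 1 ≤ n then PySem.List.slice arr none (some (n - 1)) else []
  let suf := head.foldr (fun x acc => (x + acc.headD 0) :: acc) ([0] : List Int)
  ((head.zip (suf.drop 1)).filter (fun p => p.1 ≥ p.2)).map Prod.fst
    ++ [PySem.List.pyGetD arr (n - 1) 0]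

-- ===== PRECONDITION & SPEC =====
-- Pre_: exactly the inputs where Python A returns (indices arr[n-1] and arr[0..n-2]
-- all valid); outside it A raises IndexError.
def Pre_solution (arr : List Int) (n : Int) : Prop :=
  1 - (arr.length : Int) ≤ n ∧ n ≤ (arr.length : Int)
instance (arr : List Int) (n : Int) : Decidable (Pre_solution arr n) := by
  unfold Pre_solution; infer_instance

def pvWitness_solution : List Int × Int := ([3, 1, 2], 3)

def Spec_solution (arr : List Int) (n : Int) (out : List Int) : Prop := out = solution_alt arr n
instance (arr : List Int) (n : Int) (out : List Int) : Decidable (Spec_solution arr n out) := by unfold Spec_solution; infer_instance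

-- ===== CLAIM (what is proved, stated in full; the proofs are below) =====
def Claim_equal_solution : Prop := ∀ (arr : List Int) (n : Int), Dom_solution arr n → Pre_solution arr n → Spec_solution arr n (solution arr n)

-- ===== LEMMAS AND PROOFS =====

-- elements of ys that are ≥ the sum of the elements after them
def keepG : List Int → List Int
  | [] => []
  | x :: t => (if x ≥ t.sum then [x] else []) ++ keepG t

theorem keepG_foldA (ys : List Int) (acc : List Int) :
    ys.reverse.foldl
      (fun (st : List Int × Int) x =>
        (if x ≥ st.2 then st.1 ++ [x] else st.1, st.2 + x))
      (acc, 0)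
    = (acc ++ (keepG ys).reverse, ys.sum) := by
  induction ys generalizing acc with
  | nil => simp [show keepG [] = [] from rfl]
  | cons x t ih =>
    simp only [List.reverse_cons, List.foldl_append, ih, List.foldl_cons, List.foldl_nil, keepG]
    split_ifs <;> simp <;> omega

-- the suffix-sum table B's backward loop fills
def sufS : List Int → List Int
  | [] => [0]
  | x :: t => (x + t.sum) :: sufS t

theorem sufS_shape (ys : List Int) : sufS ys = ys.sum :: (sufS ys).drop 1 := by
  cases ys <;> simp [sufS]

theorem foldr_eq_sufS (ys : List Int) :
    ys.foldr (fun x acc => (x + acc.headD 0) :: acc) ([0] : List Int) = sufS ys := by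
  induction ys with
  | nil => rfl
  | cons x t ih =>
    simp only [List.foldr_cons, ih, sufS]
    rw [sufS_shape t]
    simp

theorem zip_filter_eq_keepG (ys : List Int) :
    (((ys.zip ((sufS ys).drop 1)).filter (fun p => p.1 ≥ p.2)).map Prod.fst)
      = keepG ys := by
  induction ys with
  | nil => rfl
  | cons x t ih =>
    show (((x :: t).zip (sufS t)).filter _).map _ = _
    rw [sufS_shape t]
    simp only [List.zip_cons_cons, List.filter_cons, keepG]
    split_ifs with h h2 <;> simp_all

theorem map_get_range (arr : List Int) (m : Nat) (h : m ≤ arr.length) :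
    (PySem.List.pyRange 0 (m : Int) 1).map (fun i => PySem.List.pyGetD arr i 0)
      = arr.take m := by
  have hlen : (arr.take m).length = m := by simp [List.length_take]; omega
  have h2 := PySem.List.map_pyGetD_pyRange_zero (xs := arr.take m) (d := 0)
  rw [PySem.List.len_eq, hlen] at h2
  rw [← h2]
  apply List.map_congr_left
  intro i hi
  rw [PySem.List.mem_pyRange_one] at hi
  have h0 : 0 ≤ i := hi.1
  have hlt : i < (m : Int) := hi.2
  rw [PySem.List.pyGetD_eq_getElem arr 0 h0 (by omega),
      PySem.List.pyGetD_eq_getElem (arr.take m) 0 h0 (by omega)]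
  rw [List.getElem_take]

-- A's result is keepG of the prefix arr[:n-1], followed by arr[n-1]
theorem solution_eq_keepG (arr : List Int) (n : Int)
    (hn : 1 < n) (hhi : n ≤ (arr.length : Int)) :
    solution arr n = keepG (arr.take (n - 1).toNat) ++ [PySem.List.pyGetD arr (n - 1) 0] := by
  unfold solution
  set m : Nat := (n - 1).toNat with hm
  have hmle : m ≤ arr.length := by omega
  have hcast : n - 1 = (m : Int) := by omega
  have hmap : (PySem.List.pyRange 0 (n - 1) 1).map (fun i => PySem.List.pyGetD arr i 0)
      = arr.take m := by rw [hcast]; exact map_get_range arr m hmle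
  have hrange : PySem.List.pyRange (n - 2) (-1) (-1)
      = (PySem.List.pyRange 0 (n - 1) 1).reverse := by
    rw [PySem.List.pyRange_neg_one_eq_reverse]
    norm_num [show n - 2 + 1 = n - 1 from by ring]
  have hrev : (arr.take m).reverse
      = (PySem.List.pyRange 0 (n - 1) 1).reverse.map (fun i => PySem.List.pyGetD arr i 0) := by
    rw [← hmap, List.map_reverse]
  rw [hrange,
      show ((PySem.List.pyRange 0 (n - 1) 1).reverse.foldl
        (fun (st : List Int × Int) i =>
          (if PySem.List.pyGetD arr i 0 ≥ st.2 then st.1 ++ [PySem.List.pyGetD arr i 0] else st.1,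
           st.2 + PySem.List.pyGetD arr i 0))
        ([PySem.List.pyGetD arr (n - 1) 0], 0))
        = (arr.take m).reverse.foldl
            (fun (st : List Int × Int) x =>
              (if x ≥ st.2 then st.1 ++ [x] else st.1, st.2 + x))
            ([PySem.List.pyGetD arr (n - 1) 0], 0) from by rw [hrev, List.foldl_map],
      keepG_foldA]
  simp

-- ===== VERDICT (by name: the statement is the Claim_ definition above) =====
theorem solution_spec : Claim_equal_solution := by
  intro arr n _ hpre
  obtain ⟨hlo, hhi⟩ := hpre
  show solution arr n = solution_alt arr n
  by_cases hn : n ≤ 1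
  · -- A's loop is empty and B's head is empty: both return [arr[n-1]]
    unfold solution solution_alt
    by_cases h1 : 1 ≤ n
    · have hn1 : n = 1 := by omega
      subst hn1
      rw [PySem.List.pyRange_neg_one_eq_nil (by omega)]
      norm_num [PySem.List.slice_to]
    · rw [PySem.List.pyRange_neg_one_eq_nil (by omega)]
      simp [h1]
  · replace hn : 1 < n := by omega
    rw [solution_eq_keepG arr n hn hhi]
    have h1 : (1:Int) ≤ n := by omega
    simp only [solution_alt, if_pos h1, PySem.List.slice_to arr (by omega : (0:Int) ≤ n - 1),
      foldr_eq_sufS, zip_filter_eq_keepG]
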